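-- pv_equiv track=rewrite | github.com/tk-sheldo/codeJam | 2021/moons_etc/moons.py | cost_calc
-- ===== SOURCE A (Python) =====
-- def cost_calc(xc, yc, finished_mural):
--
--     cost = 0
--
--     for i in range(len(finished_mural)):
--         if i == 0:
--             pass
--         else:
--             if finished_mural[i] != finished_mural[i-1]:
--                 if finished_mural[i] == 'J':
--                     cost += xc
--                 else:
--                     cost += yc
--
--     return cost
-- ===== SOURCE B (Python) =====
-- def cost_calc(xc, yc, finished_mural):
--     # Pass 1: collapse the mural into the leading characters of maximal runs.
--     runs = []
--     for s in finished_mural: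
--         if not runs or runs[-1] != s:
--             runs.append(s)
--     # Pass 2: every run after the first is one transition; charge it.
--     return sum(xc if r == 'J' else yc for r in runs[1:])
-- ===== Notes on version B (the rewrite author's own statement) =====
-- stated objective: alternative
-- what changed: Replaces the per-index lookback loop with a two-phase run decomposition: first collapse the mural into maximal runs of equal elements, then charge one transition cost per run after the first.
import Mathlib
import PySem

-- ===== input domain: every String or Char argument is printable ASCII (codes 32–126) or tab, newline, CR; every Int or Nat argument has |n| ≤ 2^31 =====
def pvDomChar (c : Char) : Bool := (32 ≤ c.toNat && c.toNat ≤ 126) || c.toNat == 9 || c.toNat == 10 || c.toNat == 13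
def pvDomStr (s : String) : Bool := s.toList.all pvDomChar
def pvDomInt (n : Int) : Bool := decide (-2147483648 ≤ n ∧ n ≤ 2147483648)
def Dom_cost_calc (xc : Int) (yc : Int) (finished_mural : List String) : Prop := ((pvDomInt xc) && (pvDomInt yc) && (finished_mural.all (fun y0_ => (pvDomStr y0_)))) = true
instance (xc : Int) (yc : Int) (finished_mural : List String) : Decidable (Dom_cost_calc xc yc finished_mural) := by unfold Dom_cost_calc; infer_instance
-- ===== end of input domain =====

-- B collapses the mural into maximal runs and charges one transition per run after
-- the first, instead of A's per-index lookback loop; same value, total on all inputs.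

-- ===== PORT A =====
-- for i in range(len(finished_mural)): … (indices i, i-1 are always in range, so getD is exact)
def cost_calc (xc : Int) (yc : Int) (finished_mural : List String) : Int :=
  (List.range finished_mural.length).foldl
    (fun cost i =>
      if i = 0 then cost
      else
        if finished_mural.getD i "" ≠ finished_mural.getD (i - 1) "" then
          if finished_mural.getD i "" = "J" then cost + xc else cost + yc
        else cost) 0

-- ===== PORT B =====
-- pass 1 of Source B: runs.append(s) when runs is empty or runs[-1] != s
def pvRuns (finished_mural : List String) : List String :=
  finished_mural.foldl
    (fun runs s => if runs = [] ∨ runs.getLast? ≠ some s then runs ++ [s] else runs) []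

-- pass 2 of Source B: sum(xc if r == 'J' else yc for r in runs[1:])
def cost_calc_alt (xc : Int) (yc : Int) (finished_mural : List String) : Int :=
  ((pvRuns finished_mural).drop 1).foldl (fun c r => c + (if r = "J" then xc else yc)) 0

-- ===== PRECONDITION & SPEC =====
def Spec_cost_calc (xc : Int) (yc : Int) (finished_mural : List String) (out : Int) : Prop := out = cost_calc_alt xc yc finished_mural
instance (xc : Int) (yc : Int) (finished_mural : List String) (out : Int) : Decidable (Spec_cost_calc xc yc finished_mural out) := by unfold Spec_cost_calc; infer_instance

-- ===== CLAIM (what is proved, stated in full; the proofs are below) =====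
def Claim_equal_cost_calc : Prop := ∀ (xc : Int) (yc : Int) (finished_mural : List String), Dom_cost_calc xc yc finished_mural → Spec_cost_calc xc yc finished_mural (cost_calc xc yc finished_mural)

-- ===== LEMMAS AND PROOFS =====

lemma pvRuns_append (ys : List String) (z : String) :
    pvRuns (ys ++ [z]) =
      if pvRuns ys = [] ∨ (pvRuns ys).getLast? ≠ some z then pvRuns ys ++ [z] else pvRuns ys := by
  simp [pvRuns, List.foldl_append]

lemma pvRuns_ne_nil (xs : List String) (h : xs ≠ []) : pvRuns xs ≠ [] := by
  induction xs using List.reverseRecOn with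
  | nil => exact absurd rfl h
  | append_singleton ys z ih =>
    rw [pvRuns_append]
    split
    · simp
    · rename_i hc
      push_neg at hc
      exact hc.1

lemma pvRuns_getLast? (xs : List String) (h : xs ≠ []) :
    (pvRuns xs).getLast? = xs.getLast? := by
  induction xs using List.reverseRecOn with
  | nil => exact absurd rfl h
  | append_singleton ys z ih =>
    rw [pvRuns_append, List.getLast?_concat]
    split
    · rw [List.getLast?_concat]
    · rename_i hc
      push_neg at hc
      exact hc.2

lemma cost_calc_eq_alt (xc yc : Int) (xs : List String) :
    cost_calc xc yc xs = cost_calc_alt xc yc xs := by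
  induction xs using List.reverseRecOn with
  | nil => rfl
  | append_singleton ys z ih =>
    -- A side: peel the last index off the range loop
    have hinner :
        (List.range ys.length).foldl
          (fun cost i =>
            if i = 0 then cost
            else
              if (ys ++ [z]).getD i "" ≠ (ys ++ [z]).getD (i - 1) "" then
                if (ys ++ [z]).getD i "" = "J" then cost + xc else cost + yc
              else cost) 0 = cost_calc xc yc ys := by
      unfold cost_calc
      refine List.foldl_ext _ _ 0 (fun c i hi => ?_)
      have hi' : i < ys.length := List.mem_range.mp hi
      rcases Nat.eq_zero_or_pos i with h0 | h0
      · simp [h0]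
      · have h1 : i - 1 < ys.length := lt_of_le_of_lt (Nat.sub_le i 1) hi'
        rw [List.getD_append _ _ _ _ hi', List.getD_append _ _ _ _ h1]
    have hA : cost_calc xc yc (ys ++ [z]) =
        (fun cost i =>
          if i = 0 then cost
          else
            if (ys ++ [z]).getD i "" ≠ (ys ++ [z]).getD (i - 1) "" then
              if (ys ++ [z]).getD i "" = "J" then cost + xc else cost + yc
            else cost) (cost_calc xc yc ys) ys.length := by
      unfold cost_calc
      rw [List.length_append, List.length_cons, List.length_nil, List.range_succ,
        List.foldl_append]
      simp only [List.foldl_cons, List.foldl_nil]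
      rw [hinner]
      rfl
    rcases eq_or_ne ys [] with hnil | hne
    · subst hnil
      simp [cost_calc, cost_calc_alt, pvRuns]
    · -- ys ≠ [] : the last element of ys
      obtain ⟨l, hl⟩ := List.getLast?_isSome.mpr hne |> Option.isSome_iff_exists.mp
      have hlen : 0 < ys.length := List.length_pos_iff.mpr hne
      have hz : (ys ++ [z]).getD ys.length "" = z := by
        rw [List.getD_eq_getElem?_getD, List.getElem?_append_right (Nat.le_refl _)]
        simp
      have hprev : (ys ++ [z]).getD (ys.length - 1) "" = l := by
        rw [List.getD_append _ _ _ _ (Nat.sub_lt hlen Nat.one_pos),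
          List.getD_eq_getElem?_getD, ← List.getLast?_eq_getElem?, hl]
        rfl
      have hAlen : ys.length ≠ 0 := Nat.pos_iff_ne_zero.mp hlen
      -- B side: the run list either grows by [z] or stays
      have hr := pvRuns_append ys z
      have hrl : (pvRuns ys).getLast? = some l := by rw [pvRuns_getLast? ys hne, hl]
      have hrn : pvRuns ys ≠ [] := pvRuns_ne_nil ys hne
      rcases eq_or_ne z l with hzl | hzl
      · -- no transition: both sides unchanged
        have hB : pvRuns (ys ++ [z]) = pvRuns ys := by
          rw [hr, if_neg]
          push_neg
          exact ⟨hrn, by rw [hrl, hzl]⟩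
        have halt : cost_calc_alt xc yc (ys ++ [z]) = cost_calc_alt xc yc ys := by
          unfold cost_calc_alt
          rw [hB]
        rw [hA, halt, ← ih]
        simp only [if_neg hAlen, hz, hprev]
        simp [hzl]
      · -- transition: both sides gain (if z = "J" then xc else yc)
        have hB : pvRuns (ys ++ [z]) = pvRuns ys ++ [z] := by
          rw [hr, if_pos]
          refine Or.inr ?_
          rw [hrl]
          simp only [ne_eq, Option.some.injEq]
          exact fun h => hzl h.symm
        have hdrop : (pvRuns (ys ++ [z])).drop 1 = (pvRuns ys).drop 1 ++ [z] := by
          rw [hB, List.drop_append_of_le_length (List.length_pos_iff.mpr hrn)]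
        have hBval : cost_calc_alt xc yc (ys ++ [z]) =
            cost_calc_alt xc yc ys + (if z = "J" then xc else yc) := by
          unfold cost_calc_alt
          rw [hdrop, List.foldl_append]
          rfl
        rw [hA, hBval, ← ih]
        simp only [if_neg hAlen, hz, hprev]
        rw [if_pos hzl]
        split <;> simp

-- ===== VERDICT (by name: the statement is the Claim_ definition above) =====
theorem cost_calc_spec : Claim_equal_cost_calc := by
  intro xc yc xs _
  unfold Spec_cost_calc
  exact cost_calc_eq_alt xc yc xs
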